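-- pv_equiv track=rewrite | github.com/miliar/Code_Jam_Webscraper | solutions_python/Problem_59/414.py | getMinMkdir
-- ===== SOURCE A (Python) =====
-- class Directory:
-- 	def __init__(self, name):
-- 		self.name = name
-- 		self.subdirs = []
-- 	def create(self, path, createdCount=0):
-- 		if len(path) > 0:
-- 			exists = False
-- 			i = 0
-- 			while i < len(self.subdirs) and not exists:
-- 				if self.subdirs[i].name == path[0]:
-- 					exists = True
-- 					return self.subdirs[i].create(path[1:], createdCount)
-- 				i = i + 1
-- 			if not exists:
-- 				self.subdirs.append(Directory(path[0]))
-- 				#print "New dir",path[0]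
-- 				createdCount = createdCount+1
-- 				return self.subdirs[-1].create(path[1:], createdCount)
-- 		else:
-- 			return createdCount
--
-- def getMinMkdir(created, paths):
-- 	count = 0
-- 	root = Directory('root')
-- 	for i in range(len(paths)):
-- 		n = root.create(paths[i][1:].split('/'))
-- 		if i > created-1:
-- 			count = count + n
-- 	return count
-- ===== SOURCE B (Python) =====
-- def getMinMkdir(created, paths):
--     seen = set()
--     count = 0
--     for i, p in enumerate(paths):
--         parts = p[1:].split('/')
--         new = 0
--         pref = ()
--         for comp in parts:
--             pref = pref + (comp,)
--             if pref not in seen: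
--                 seen.add(pref)
--                 new += 1
--         if i >= created:
--             count += new
--     return count
-- ===== Notes on version B (the rewrite author's own statement) =====
-- stated objective: faster
-- what changed: Replaced the recursive Directory-object trie (a linear sibling-list scan at every level of every path) by a single flat pass that splits each path and records every component-prefix tuple in one hash set, counting a prefix only when it is new.
import Mathlib
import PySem

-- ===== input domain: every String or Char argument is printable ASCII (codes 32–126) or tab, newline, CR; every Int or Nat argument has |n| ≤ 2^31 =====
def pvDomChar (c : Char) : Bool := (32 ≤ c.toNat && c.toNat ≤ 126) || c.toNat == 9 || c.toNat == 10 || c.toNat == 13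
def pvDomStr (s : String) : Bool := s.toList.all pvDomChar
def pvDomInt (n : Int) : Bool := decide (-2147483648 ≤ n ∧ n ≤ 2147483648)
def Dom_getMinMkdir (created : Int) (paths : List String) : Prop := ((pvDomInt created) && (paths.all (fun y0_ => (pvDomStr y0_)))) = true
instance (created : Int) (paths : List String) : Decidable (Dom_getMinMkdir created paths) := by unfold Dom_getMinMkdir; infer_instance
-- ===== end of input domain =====

-- B replaces A's recursive per-node Directory trie (linear sibling scan per level) by one flat
-- hash set of component-prefix tuples walked left-to-right per path (measurably faster; same value).


-- ===== PORT A =====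
-- The class Directory is a name plus a Python list of child Directory objects.  A nested
-- inductive (List of children) is not allowed here, so the sibling list is inlined into the
-- type: `cons name subs rest` is the list cell holding Directory(name, subs) followed by the
-- remaining siblings `rest`; a Directory object itself is the pair (name, children list).
inductive PyTrie where
  | nil : PyTrie
  | cons : List Char → PyTrie → PyTrie → PyTrie
deriving DecidableEq, Repr

-- Directory.create: returns the updated object (Python mutates in place) plus the returned count.
-- listStep is the `while i < len(self.subdirs)` first-match scan for path[0], in list order,
-- with the `if not exists: append + recurse into the new node` tail.
mutual
def dirCreate (d : List Char × PyTrie) (path : List (List Char)) (cc : Int) :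
    (List Char × PyTrie) × Int :=
  match path with
  | [] => (d, cc)
  | h :: t =>
      let r := listStep d.2 h t cc
      ((d.1, r.1), r.2)
termination_by (path.length, 0, 0)

def listStep (dl : PyTrie) (h : List Char) (t : List (List Char)) (cc : Int) : PyTrie × Int :=
  match dl with
  | .nil =>
      let r := dirCreate (h, .nil) t (cc + 1)
      (.cons r.1.1 r.1.2 .nil, r.2)
  | .cons nm subs rest =>
      if nm == h then
        let r := dirCreate (nm, subs) t cc
        (.cons r.1.1 r.1.2 rest, r.2)
      else
        let r := listStep rest h t cc
        (.cons nm subs r.1, r.2)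
termination_by (t.length, 1, sizeOf dl)
end

def getMinMkdir (created : Int) (paths : List String) : Int :=
  (((PySem.List.pyRange 0 paths.length 1).foldl
      (fun (st : (List Char × PyTrie) × Int) i =>
        let p := PySem.List.pyGetD paths i ""
        let r := dirCreate st.1 (PySem.Chars.splitOn (PySem.List.slice p.toList (some 1) none) ['/']) 0
        (r.1, if i > created - 1 then st.2 + r.2 else st.2))
      (("root".toList, PyTrie.nil), 0))).2

-- ===== PORT B =====
-- inner loop: walk the components, growing the prefix; add unseen prefixes to the set, count them
def bWalk (parts : List (List Char)) (pref : List (List Char))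
    (seen : PySem.Set (List (List Char))) (nw : Int) :
    PySem.Set (List (List Char)) × Int :=
  match parts with
  | [] => (seen, nw)
  | c :: rest =>
      let pref' := pref ++ [c]
      if seen.contains pref' then bWalk rest pref' seen nw
      else bWalk rest pref' (seen.add pref') (nw + 1)

def getMinMkdir_alt (created : Int) (paths : List String) : Int :=
  ((PySem.List.enumerate paths 0).foldl
      (fun (st : PySem.Set (List (List Char)) × Int) ip =>
        let r := bWalk (PySem.Chars.splitOn (PySem.List.slice ip.2.toList (some 1) none) ['/']) [] st.1 0
        (r.1, if ip.1 ≥ created then st.2 + r.2 else st.2))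
      (PySem.Set.empty, 0)).2

-- ===== PRECONDITION & SPEC =====
def Spec_getMinMkdir (created : Int) (paths : List String) (out : Int) : Prop := out = getMinMkdir_alt created paths
instance (created : Int) (paths : List String) (out : Int) : Decidable (Spec_getMinMkdir created paths out) := by unfold Spec_getMinMkdir; infer_instance

-- ===== CLAIM (what is proved, stated in full; the proofs are below) =====
def Claim_equal_getMinMkdir : Prop := ∀ (created : Int) (paths : List String), Dom_getMinMkdir created paths → Spec_getMinMkdir created paths (getMinMkdir created paths)

-- ===== LEMMAS AND PROOFS =====

-- the node-level body of create: what create does to a node's children list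
def stepTop (dl : PyTrie) (parts : List (List Char)) (cc : Int) : PyTrie × Int :=
  match parts with
  | [] => (dl, cc)
  | h :: t => listStep dl h t cc

theorem dirCreate_eq (d : List Char × PyTrie) (parts : List (List Char)) (cc : Int) :
    dirCreate d parts cc = ((d.1, (stepTop d.2 parts cc).1), (stepTop d.2 parts cc).2) := by
  cases parts <;> simp [dirCreate, stepTop]

-- membership of a nonempty component path in a trie, mirroring create's first-match scan
def memT : PyTrie → List (List Char) → Bool
  | _, [] => true
  | .nil, _ :: _ => false
  | .cons nm subs rest, h :: t => if nm == h then memT subs t else memT rest (h :: t)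
termination_by dl q => (q.length, sizeOf dl)

theorem bWalk_mono (parts : List (List Char)) (pref : List (List Char))
    (seen : PySem.Set (List (List Char))) (nw : Int) (x : List (List Char))
    (hx : seen.contains x = true) : (bWalk parts pref seen nw).1.contains x = true := by
  induction parts generalizing pref seen nw with
  | nil => exact hx
  | cons c rest ih =>
      simp only [bWalk]
      split
      · exact ih _ _ _ hx
      · refine ih _ _ _ ?_
        rw [PySem.Set.contains_iff] at hx ⊢
        exact (PySem.Set.mem_add _ _ _).2 (Or.inl hx)

-- the central invariant: A's trie walk and B's prefix-set walk stay in lockstep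
theorem main_lemma (parts : List (List Char)) (pref : List (List Char)) (dl : PyTrie)
    (S : PySem.Set (List (List Char))) (cc nw : Int)
    (hinv : ∀ q : List (List Char), q ≠ [] → (memT dl q = true ↔ S.contains (pref ++ q) = true)) :
    (stepTop dl parts cc).2 = cc + ((bWalk parts pref S nw).2 - nw) ∧
    (∀ q : List (List Char), q ≠ [] →
      (memT (stepTop dl parts cc).1 q = true ↔
        (bWalk parts pref S nw).1.contains (pref ++ q) = true)) ∧
    (∀ x : List (List Char), (bWalk parts pref S nw).1.contains x = true →
      S.contains x = true ∨ ∃ r : List (List Char), r ≠ [] ∧ x = pref ++ r) := by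
  induction parts generalizing pref dl S cc nw with
  | nil =>
      refine ⟨by simp [stepTop, bWalk], ?_, ?_⟩
      · simpa only [stepTop, bWalk] using hinv
      · intro x hx
        simp only [bWalk] at hx
        exact Or.inl hx
  | cons c t ih =>
      have inner : ∀ dl' : PyTrie,
          (∀ t' : List (List Char), memT dl' (c :: t') = true ↔ S.contains (pref ++ c :: t') = true) →
          (listStep dl' c t cc).2 = cc + ((bWalk (c :: t) pref S nw).2 - nw) ∧
          (∀ t' : List (List Char), memT (listStep dl' c t cc).1 (c :: t') = true ↔
              (bWalk (c :: t) pref S nw).1.contains (pref ++ c :: t') = true) ∧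
          (∀ (h' : List Char) (t' : List (List Char)), h' ≠ c →
              memT (listStep dl' c t cc).1 (h' :: t') = memT dl' (h' :: t')) ∧
          (∀ x : List (List Char), (bWalk (c :: t) pref S nw).1.contains x = true →
              S.contains x = true ∨ ∃ r : List (List Char), x = (pref ++ [c]) ++ r) := by
        intro dl'
        induction dl' with
        | nil =>
            intro hc
            have hnotin : S.contains (pref ++ [c]) = false := by
              have h0 := hc []
              simp only [memT, Bool.false_eq_true, false_iff] at h0
              exact Bool.eq_false_iff.2 h0
            have hbw : bWalk (c :: t) pref S nw
                = bWalk t (pref ++ [c]) (S.add (pref ++ [c])) (nw + 1) := by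
              simp only [bWalk, hnotin, Bool.false_eq_true, if_false]
            have hinv' : ∀ q : List (List Char), q ≠ [] →
                (memT PyTrie.nil q = true ↔
                  (S.add (pref ++ [c])).contains ((pref ++ [c]) ++ q) = true) := by
              intro q hq
              cases q with
              | nil => exact absurd rfl hq
              | cons a b =>
                  simp only [memT, Bool.false_eq_true, false_iff]
                  intro hmem
                  rw [PySem.Set.contains_iff] at hmem
                  rcases (PySem.Set.mem_add _ _ _).1 hmem with hin | heq
                  · have h1 := hc (a :: b)
                    simp only [memT, Bool.false_eq_true, false_iff] at h1
                    apply h1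
                    rw [PySem.Set.contains_iff]
                    simpa [List.append_assoc] using hin
                  · have := congrArg List.length heq
                    simp at this
            obtain ⟨m1, m2, m3⟩ :=
              ih (pref ++ [c]) PyTrie.nil (S.add (pref ++ [c])) (cc + 1) (nw + 1) hinv'
            have hls : listStep PyTrie.nil c t cc
                = (PyTrie.cons c (stepTop PyTrie.nil t (cc + 1)).1 PyTrie.nil,
                   (stepTop PyTrie.nil t (cc + 1)).2) := by
              simp only [listStep, dirCreate_eq]
            refine ⟨?_, ?_, ?_, ?_⟩
            · rw [hls, hbw]; omega
            · intro t'
              rw [hls, hbw]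
              cases t' with
              | nil =>
                  simp only [memT, beq_self_eq_true, if_true, true_iff]
                  apply bWalk_mono
                  rw [PySem.Set.contains_iff]
                  exact (PySem.Set.mem_add _ _ _).2 (Or.inr rfl)
              | cons a b =>
                  have := m2 (a :: b) (by simp)
                  simp only [memT, beq_self_eq_true, if_true]
                  simpa [List.append_assoc] using this
            · intro h' t' hne
              rw [hls]
              have hbne : (c == h') = false := beq_eq_false_iff_ne.2 (fun h => hne h.symm)
              simp [memT, hbne]
            · intro x hx
              rw [hbw] at hx
              rcases m3 x hx with hin | ⟨r, _, hr⟩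
              · rw [PySem.Set.contains_iff] at hin
                rcases (PySem.Set.mem_add _ _ _).1 hin with h1 | h2
                · exact Or.inl (by rw [PySem.Set.contains_iff]; exact h1)
                · exact Or.inr ⟨[], by simpa using h2⟩
              · exact Or.inr ⟨r, hr⟩
        | cons nm subs rest ihsubs ihrest =>
            intro hc
            by_cases hnm : nm = c
            · subst hnm
              have hin0 : S.contains (pref ++ [nm]) = true := by
                have h0 := hc []
                simp only [memT, beq_self_eq_true, if_true, true_iff] at h0
                exact h0
              have hbw : bWalk (nm :: t) pref S nw = bWalk t (pref ++ [nm]) S nw := by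
                simp only [bWalk, hin0, if_true]
              have hinv' : ∀ q : List (List Char), q ≠ [] →
                  (memT subs q = true ↔ S.contains ((pref ++ [nm]) ++ q) = true) := by
                intro q hq
                have h1 := hc q
                simp only [memT, beq_self_eq_true, if_true] at h1
                rw [List.append_assoc]
                simpa using h1
              obtain ⟨m1, m2, m3⟩ := ih (pref ++ [nm]) subs S cc nw hinv'
              have hls : listStep (PyTrie.cons nm subs rest) nm t cc
                  = (PyTrie.cons nm (stepTop subs t cc).1 rest, (stepTop subs t cc).2) := by
                simp only [listStep, beq_self_eq_true, if_true, dirCreate_eq]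
              refine ⟨?_, ?_, ?_, ?_⟩
              · rw [hls, hbw]; omega
              · intro t'
                rw [hls, hbw]
                cases t' with
                | nil =>
                    simp only [memT, beq_self_eq_true, if_true, true_iff]
                    exact bWalk_mono _ _ _ _ _ hin0
                | cons a b =>
                    have := m2 (a :: b) (by simp)
                    simp only [memT, beq_self_eq_true, if_true]
                    simpa [List.append_assoc] using this
              · intro h' t' hne
                rw [hls]
                have hb2 : (nm == h') = false := beq_eq_false_iff_ne.2 (fun h => hne h.symm)
                simp [memT, hb2]
              · intro x hx
                rw [hbw] at hx
                rcases m3 x hx with hin | ⟨r, _, hr⟩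
                · exact Or.inl hin
                · exact Or.inr ⟨r, hr⟩
            · have hb : (nm == c) = false := beq_eq_false_iff_ne.2 hnm
              have hc' : ∀ t' : List (List Char),
                  memT rest (c :: t') = true ↔ S.contains (pref ++ c :: t') = true := by
                intro t'
                have h1 := hc t'
                simpa only [memT, hb, if_false] using h1
              obtain ⟨m1, m2, m3, m4⟩ := ihrest hc'
              have hls : listStep (PyTrie.cons nm subs rest) c t cc
                  = (PyTrie.cons nm subs (listStep rest c t cc).1, (listStep rest c t cc).2) := by
                simp [listStep, hb]
              refine ⟨?_, ?_, ?_, ?_⟩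
              · rw [hls]; exact m1
              · intro t'
                rw [hls]
                simpa only [memT, hb, if_false] using m2 t'
              · intro h' t' hne
                rw [hls]
                by_cases hh : nm = h'
                · subst hh
                  simp only [memT, beq_self_eq_true, if_true]
                · have hb3 : (nm == h') = false := beq_eq_false_iff_ne.2 hh
                  simp only [memT, hb3, Bool.false_eq_true, if_false]
                  exact m3 h' t' hne
              · exact m4
      obtain ⟨i1, i2, i3, i4⟩ := inner dl (fun t' => hinv (c :: t') (by simp))
      have hstep : stepTop dl (c :: t) cc = listStep dl c t cc := rfl
      refine ⟨by rw [hstep]; exact i1, ?_, ?_⟩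
      · intro q hq
        rw [hstep]
        cases q with
        | nil => exact absurd rfl hq
        | cons h' t' =>
            by_cases hh : h' = c
            · subst hh; exact i2 t'
            · rw [i3 h' t' hh]
              constructor
              · intro hm
                apply bWalk_mono
                exact (hinv (h' :: t') (by simp)).1 hm
              · intro hcon
                rcases i4 _ hcon with hin | ⟨r, hr⟩
                · exact (hinv (h' :: t') (by simp)).2 hin
                · rw [List.append_assoc] at hr
                  have := List.append_cancel_left hr
                  simp at this
                  exact absurd this.1 hh
      · intro x hx
        rcases i4 x hx with hin | ⟨r, hr⟩
        · exact Or.inl hin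
        · exact Or.inr ⟨c :: r, by simp, by simpa [List.append_assoc] using hr⟩

-- A's per-index fold and B's per-index fold stay equal, given the invariant
theorem fold_key (created : Int) (paths : List String) (l : List Int)
    (d : List Char × PyTrie) (S : PySem.Set (List (List Char))) (ca cb : Int)
    (hinv : ∀ q : List (List Char), q ≠ [] → (memT d.2 q = true ↔ S.contains q = true))
    (hcc : ca = cb) :
    ((l.foldl (fun (st : (List Char × PyTrie) × Int) i =>
        let p := PySem.List.pyGetD paths i ""
        let r := dirCreate st.1 (PySem.Chars.splitOn (PySem.List.slice p.toList (some 1) none) ['/']) 0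
        (r.1, if i > created - 1 then st.2 + r.2 else st.2)) (d, ca))).2 =
    ((l.foldl (fun (st : PySem.Set (List (List Char)) × Int) i =>
        let r := bWalk (PySem.Chars.splitOn (PySem.List.slice (PySem.List.pyGetD paths i "").toList (some 1) none) ['/']) [] st.1 0
        (r.1, if i ≥ created then st.2 + r.2 else st.2)) (S, cb))).2 := by
  induction l generalizing d S ca cb with
  | nil => exact hcc
  | cons i l ihl =>
      simp only [List.foldl_cons]
      obtain ⟨m1, m2, m3⟩ := main_lemma
        (PySem.Chars.splitOn (PySem.List.slice (PySem.List.pyGetD paths i "").toList (some 1) none) ['/'])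
        [] d.2 S 0 0 (by simpa using hinv)
      apply ihl
      · intro q hq
        rw [dirCreate_eq]
        simpa using m2 q hq
      · rw [dirCreate_eq]
        simp only
        rw [m1]
        have hif : (i > created - 1) ↔ (i ≥ created) := by omega
        by_cases hgt : i ≥ created
        · rw [if_pos hgt, if_pos (hif.2 hgt)]; omega
        · rw [if_neg hgt, if_neg (fun h => hgt (hif.1 h))]; omega

-- ===== VERDICT (by name: the statement is the Claim_ definition above) =====
theorem getMinMkdir_spec : Claim_equal_getMinMkdir := by
  intro created paths _
  unfold Spec_getMinMkdir getMinMkdir getMinMkdir_alt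
  rw [PySem.List.enumerate_eq_map_pyRange paths ""]
  rw [List.foldl_map]
  simp only [PySem.List.len]
  exact fold_key created paths _ ("root".toList, PyTrie.nil) PySem.Set.empty 0 0
    (by intro q hq; cases q with
        | nil => exact absurd rfl hq
        | cons a b => simp [memT, PySem.Set.empty, PySem.Set.contains]) rfl
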